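-- pv_equiv track=rewrite | github.com/wonseokjee/code-practice | main/src/algorithm/codingTest/2864(5와6의차이).py | check
-- ===== SOURCE A (Python) =====
-- def check (lst):
--     ins = []
--     for i in lst:
--         if i == '5' or i == '6':
--             if len(ins) == 0:
--                 ins.append('5')
--                 ins.append('6')
--             else:
--                 ins_lst = []
--                 for k in ins:
--                     ins_lst.append(k + '5')
--                     ins_lst.append(k + '6')
--                 ins = ins_lst
--         else:
--             if len(ins) == 0:
--                 ins.append(i)
--             else:
--                 ins_lst = []
--                 for k in ins:
--                     ins_lst.append(k + i)
--                 ins = ins_lst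
--     return ins
-- ===== SOURCE B (Python) =====
-- def check(lst):
--     if not lst:
--         return []
--     m = sum(1 for c in lst if c in ('5', '6'))
--     out = []
--     for j in range(1 << m):
--         s = ''
--         b = m
--         for c in lst:
--             if c in ('5', '6'):
--                 b -= 1
--                 s += '6' if (j >> b) & 1 else '5'
--             else:
--                 s += c
--         out.append(s)
--     return out
-- ===== Notes on version B (the rewrite author's own statement) =====
-- stated objective: alternative
-- what changed: Replaces A's incremental prefix-doubling (rebuilding the whole intermediate result list and re-concatenating every prefix at each character) by counting the wild positions m and decoding each of the 2^m output strings directly from the bits of its index j, building every output once in one left-to-right pass.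
import Mathlib
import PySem

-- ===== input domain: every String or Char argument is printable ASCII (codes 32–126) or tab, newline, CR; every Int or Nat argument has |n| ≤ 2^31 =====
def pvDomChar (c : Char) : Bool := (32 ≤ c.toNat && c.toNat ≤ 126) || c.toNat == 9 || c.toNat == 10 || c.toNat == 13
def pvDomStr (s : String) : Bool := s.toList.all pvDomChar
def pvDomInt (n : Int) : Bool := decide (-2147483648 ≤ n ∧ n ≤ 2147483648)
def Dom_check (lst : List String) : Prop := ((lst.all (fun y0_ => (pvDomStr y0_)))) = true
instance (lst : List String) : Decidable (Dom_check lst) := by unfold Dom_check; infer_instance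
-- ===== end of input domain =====

-- B replaces A's prefix-doubling accumulator by counting the wild ('5'/'6') positions m and
-- decoding each of the 2^m outputs directly from the bits of its index; alternative, same cost.

-- ===== PORT A =====
-- A's loop over lst with accumulator ins; the inner for-append loops become flatMap.
def check (lst : List String) : List String :=
  lst.foldl (fun ins i =>
    if i = "5" ∨ i = "6" then
      if ins.length = 0 then ["5", "6"]
      else ins.flatMap (fun k => [k ++ "5", k ++ "6"])
    else
      if ins.length = 0 then [i]
      else ins.flatMap (fun k => [k ++ i])) []

-- ===== PORT B =====
-- the inner loop of B: state (s, b); at a wild char decrement b and consume bit b of j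
def stepB (j : Nat) (acc : String × Nat) (c : String) : String × Nat :=
  if c = "5" ∨ c = "6" then
    let b := acc.2 - 1
    (acc.1 ++ (if (j >>> b) &&& 1 = 1 then "6" else "5"), b)
  else (acc.1 ++ c, acc.2)

def check_alt (lst : List String) : List String :=
  if lst = [] then []
  else
    let m := (lst.filter (fun c => c = "5" ∨ c = "6")).length
    (List.range (2 ^ m)).map (fun j => (lst.foldl (stepB j) ("", m)).1)

-- ===== PRECONDITION & SPEC =====
def Spec_check (lst : List String) (out : List String) : Prop := out = check_alt lst
instance (lst : List String) (out : List String) : Decidable (Spec_check lst out) := by unfold Spec_check; infer_instance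

-- ===== CLAIM (what is proved, stated in full; the proofs are below) =====
def Claim_equal_check : Prop := ∀ (lst : List String), Dom_check lst → Spec_check lst (check lst)

-- ===== LEMMAS AND PROOFS =====

-- the common reference value: per-position options, rightmost fastest
def optsOf (s : String) : List String := if s = "5" ∨ s = "6" then ["5", "6"] else [s]

def combos (lst : List String) : List String :=
  lst.foldr (fun c acc => (optsOf c).flatMap (fun x => acc.map (fun t => x ++ t))) [""]

def countWild (lst : List String) : Nat := (lst.filter (fun c => c = "5" ∨ c = "6")).length

-- ---- A-side: check = combos on nonempty input ----
def stepA (ins : List String) (i : String) : List String :=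
  if i = "5" ∨ i = "6" then
    if ins.length = 0 then ["5", "6"]
    else ins.flatMap (fun k => [k ++ "5", k ++ "6"])
  else
    if ins.length = 0 then [i]
    else ins.flatMap (fun k => [k ++ i])

theorem check_eq_foldl (lst : List String) : check lst = lst.foldl stepA [] := rfl

theorem stepA_ne_nil (ins : List String) (i : String) (h : ins ≠ []) :
    stepA ins i = ins.flatMap (fun k => (optsOf i).map (fun x => k ++ x)) := by
  unfold stepA optsOf
  have hl : ins.length ≠ 0 := by simpa using h
  split_ifs <;> simp_all

theorem optsOf_ne_nil (i : String) : optsOf i ≠ [] := by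
  unfold optsOf; split_ifs <;> simp

theorem flatMap_opts_ne_nil (ins : List String) (i : String) (h : ins ≠ []) :
    ins.flatMap (fun k => (optsOf i).map (fun x => k ++ x)) ≠ [] := by
  cases ins with
  | nil => exact absurd rfl h
  | cons a t =>
    simp only [ne_eq, List.flatMap_eq_nil_iff, List.map_eq_nil_iff, not_forall]
    exact ⟨a, by simp, optsOf_ne_nil i⟩

theorem foldl_stepA (l : List String) (acc : List String) (h : acc ≠ []) :
    l.foldl stepA acc = acc.flatMap (fun p => (combos l).map (fun t => p ++ t)) := by
  induction l generalizing acc with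
  | nil =>
    simp [combos]
  | cons i l ih =>
    rw [List.foldl_cons, stepA_ne_nil acc i h,
        ih _ (flatMap_opts_ne_nil acc i h)]
    simp only [combos, List.foldr_cons, List.map_flatMap, List.flatMap_map, List.flatMap_assoc,
      List.map_map, Function.comp_def, String.append_assoc]

-- ---- bit lemmas ----
theorem bit_low (m b j : Nat) (hb : b < m) :
    ((2 ^ m + j) >>> b) &&& 1 = (j >>> b) &&& 1 := by
  simp only [Nat.shiftRight_eq_div_pow, Nat.and_one_is_mod]
  have h1 : 2 ^ m = 2 ^ b * 2 ^ (m - b) := by rw [← pow_add]; congr 1; omega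
  have h2 : (2 ^ b * 2 ^ (m - b) + j) / 2 ^ b = 2 ^ (m - b) + j / 2 ^ b :=
    Nat.mul_add_div ((Nat.pow_pos (by norm_num : (0:Nat) < 2) : 0 < 2 ^ b)) _ _
  rw [h1, h2]
  have h3 : 2 ^ (m - b) = 2 * 2 ^ (m - b - 1) := by
    rw [← pow_succ']; congr 1; omega
  omega

theorem bit_top_lo (m j : Nat) (hj : j < 2 ^ m) : (j >>> m) &&& 1 = 0 := by
  simp only [Nat.shiftRight_eq_div_pow, Nat.and_one_is_mod]
  rw [Nat.div_eq_of_lt hj]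

theorem bit_top_hi (m j : Nat) (hj : j < 2 ^ m) : ((2 ^ m + j) >>> m) &&& 1 = 1 := by
  simp only [Nat.shiftRight_eq_div_pow, Nat.and_one_is_mod]
  have h2 : (2 ^ m * 1 + j) / 2 ^ m = 1 + j / 2 ^ m :=
    Nat.mul_add_div ((Nat.pow_pos (by norm_num : (0:Nat) < 2) : 0 < 2 ^ m)) _ _
  rw [Nat.mul_one] at h2
  rw [h2, Nat.div_eq_of_lt hj]

theorem countWild_cons_wild (c : String) (t : List String) (h : c = "5" ∨ c = "6") :
    countWild (c :: t) = countWild t + 1 := by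
  simp [countWild, h]

theorem countWild_cons_tame (c : String) (t : List String) (h : ¬ (c = "5" ∨ c = "6")) :
    countWild (c :: t) = countWild t := by
  simp [countWild, h]

-- ---- B-side: the fold reads only bits below countWild ----
theorem foldB_congr (t : List String) (p : String) (j j' : Nat)
    (h : ∀ b, b < countWild t → (j >>> b) &&& 1 = (j' >>> b) &&& 1) :
    t.foldl (stepB j) (p, countWild t) = t.foldl (stepB j') (p, countWild t) := by
  induction t generalizing p with
  | nil => rfl
  | cons c t ih =>
    by_cases hc : c = "5" ∨ c = "6"
    · rw [List.foldl_cons, List.foldl_cons]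
      have hm := countWild_cons_wild c t hc
      simp only [stepB, if_pos hc, hm, Nat.add_sub_cancel]
      rw [h (countWild t) (by omega)]
      exact ih _ (fun b hb => h b (by omega))
    · rw [List.foldl_cons, List.foldl_cons]
      have hm := countWild_cons_tame c t hc
      simp only [stepB, if_neg hc, hm]
      exact ih _ (fun b hb => h b (by omega))

-- ---- B-side main induction: index decoding enumerates exactly combos ----
theorem mapRange_fold (lst : List String) : ∀ (p : String),
    (List.range (2 ^ countWild lst)).map (fun j => (lst.foldl (stepB j) (p, countWild lst)).1)
      = (combos lst).map (fun t => p ++ t) := by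
  induction lst with
  | nil => intro p; simp [countWild, combos]
  | cons c t ih =>
    intro p
    by_cases hc : c = "5" ∨ c = "6"
    · have hm := countWild_cons_wild c t hc
      rw [hm]
      have hsplit : (2 : Nat) ^ (countWild t + 1) = 2 ^ countWild t + 2 ^ countWild t := by ring
      rw [hsplit, List.range_add, List.map_append, List.map_map]
      have hfst : (List.range (2 ^ countWild t)).map
          (fun j => ((c :: t).foldl (stepB j) (p, countWild t + 1)).1)
          = (combos t).map (fun u => (p ++ "5") ++ u) := by
        rw [List.map_congr_left (fun j hj => ?_), ih (p ++ "5")]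
        have hjlt : j < 2 ^ countWild t := List.mem_range.mp hj
        rw [List.foldl_cons]
        simp only [stepB, if_pos hc, Nat.add_sub_cancel]
        rw [bit_top_lo _ _ hjlt]
        simp
      have hsnd : ((List.range (2 ^ countWild t)).map
          (fun j => ((c :: t).foldl (stepB (2 ^ countWild t + j)) (p, countWild t + 1)).1))
          = (combos t).map (fun u => (p ++ "6") ++ u) := by
        rw [List.map_congr_left (fun j hj => ?_), ih (p ++ "6")]
        have hjlt : j < 2 ^ countWild t := List.mem_range.mp hj
        rw [List.foldl_cons]
        simp only [stepB, if_pos hc, Nat.add_sub_cancel]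
        rw [bit_top_hi _ _ hjlt]
        exact congrArg Prod.fst
          (foldB_congr t (p ++ "6") (2 ^ countWild t + j) j
            (fun b hb => bit_low _ _ _ hb))
      rw [hfst]
      have hcomp : ((List.range (2 ^ countWild t)).map ((fun j => ((c :: t).foldl (stepB j) (p, countWild t + 1)).1) ∘ (fun x => 2 ^ countWild t + x)))
          = (combos t).map (fun u => (p ++ "6") ++ u) := by
        rw [← hsnd]; rfl
      rw [hcomp]
      simp only [combos, List.foldr_cons, optsOf, if_pos hc]
      simp [Function.comp_def, String.append_assoc]
    · have hm := countWild_cons_tame c t hc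
      rw [hm]
      rw [List.map_congr_left (fun j hj => ?_), ih (p ++ c)]
      · simp only [combos, List.foldr_cons, optsOf, if_neg hc]
        simp [Function.comp_def, String.append_assoc]
      · rw [List.foldl_cons]
        simp only [stepB, if_neg hc]

-- ===== VERDICT (by name: the statement is the Claim_ definition above) =====
theorem check_spec : Claim_equal_check := by
  intro lst _
  unfold Spec_check
  cases lst with
  | nil => rfl
  | cons i l =>
    rw [check_eq_foldl, List.foldl_cons]
    have h0 : stepA [] i = optsOf i := by
      unfold stepA optsOf; split_ifs <;> simp_all
    rw [h0, foldl_stepA l _ (optsOf_ne_nil i)]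
    have hB := mapRange_fold (i :: l) ""
    simp only [check_alt, if_neg (List.cons_ne_nil i l)]
    rw [show (((i :: l).filter (fun c => c = "5" ∨ c = "6")).length) = countWild (i :: l) from rfl, hB]
    simp [combos]
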